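-- pv_equiv track=rewrite | github.com/Mr81wx/HoopTransformer | Model/geometry.py | split_list_by_v
-- ===== SOURCE A (Python) =====
-- def split_list_by_v(tensor):
--     fragment_per_agent = []
--     for agnet_v in tensor:
--         fragments = []
--         start_index = None
--
--         for i, num in enumerate(agnet_v):
--             if num == 1:
--                 if start_index is None:
--                     start_index = i
--             elif start_index is not None:
--                 fragments.append((start_index,i-1))
--                 start_index = None
--
--         if start_index is not None:
--             fragments.append((start_index,len(agnet_v)-1))
--         fragment_per_agent.append(fragments)
--
--     return(fragment_per_agent)
-- ===== SOURCE B (Python) =====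
-- def split_list_by_v(tensor):
--     result = []
--     for row in tensor:
--         frags = []
--         i, n = 0, len(row)
--         while i < n:
--             if row[i] == 1:
--                 j = i
--                 while j < n and row[j] == 1:
--                     j += 1
--                 frags.append((i, j - 1))
--                 i = j
--             else:
--                 i += 1
--         result.append(frags)
--     return result
-- ===== Notes on version B (the rewrite author's own statement) =====
-- stated objective: alternative
-- what changed: Replaced A's per-element state machine (start_index Option carried through enumerate, plus an end-of-row flush) with a two-pointer scan that jumps over each maximal run of ones and emits its (start, end) directly, so no carried state or flush exists.
import Mathlib
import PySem

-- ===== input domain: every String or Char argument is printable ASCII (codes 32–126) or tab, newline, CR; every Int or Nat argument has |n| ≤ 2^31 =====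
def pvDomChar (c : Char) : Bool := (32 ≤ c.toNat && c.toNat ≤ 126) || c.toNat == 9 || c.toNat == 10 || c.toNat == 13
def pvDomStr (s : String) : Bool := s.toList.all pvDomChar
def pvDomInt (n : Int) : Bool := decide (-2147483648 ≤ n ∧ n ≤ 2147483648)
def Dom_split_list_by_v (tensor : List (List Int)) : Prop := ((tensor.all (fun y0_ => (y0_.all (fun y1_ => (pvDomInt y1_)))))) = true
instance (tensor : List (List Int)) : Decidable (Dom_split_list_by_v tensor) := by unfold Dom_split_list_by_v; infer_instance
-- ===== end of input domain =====

-- B replaces A's carried start_index state machine (with end-of-row flush) by a two-pointer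
-- scan that jumps over each maximal run of ones and emits its (start, end) directly;
-- same cost, alternative structure.

-- ===== PORT A =====
-- inner `for i, num in enumerate(agnet_v)` loop: state = (fragments, start_index)
def pvLoopA (i : Int) (st : List (Int × Int) × Option Int) : List Int → List (Int × Int) × Option Int
  | [] => st
  | num :: rest =>
    if num == 1 then
      pvLoopA (i + 1) (st.1, match st.2 with | none => some i | some s => some s) rest
    else
      match st.2 with
      | some s => pvLoopA (i + 1) (st.1 ++ [(s, i - 1)], none) rest
      | none => pvLoopA (i + 1) (st.1, none) rest

def pvRowA (row : List Int) : List (Int × Int) :=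
  let st := pvLoopA 0 ([], none) row
  match st.2 with
  | some s => st.1 ++ [(s, (row.length : Int) - 1)]
  | none => st.1

def split_list_by_v (tensor : List (List Int)) : List (List (Int × Int)) :=
  tensor.map pvRowA

-- ===== PORT B =====
-- inner `while j < n and row[j] == 1: j += 1` loop (fuel = n - j makes the while total)
def pvScanOnes (row : List Int) : Nat → Nat → Nat
  | 0, j => j
  | fuel + 1, j => if row.getD j 0 == 1 then pvScanOnes row fuel (j + 1) else j

-- outer `while i < n` loop of B (fuel = n suffices: i strictly increases each iteration)
def pvRowB (row : List Int) (n : Nat) : Nat → Nat → List (Int × Int) → List (Int × Int)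
  | 0, _, frags => frags
  | fuel + 1, i, frags =>
    if i < n then
      if row.getD i 0 == 1 then
        pvRowB row n fuel (pvScanOnes row (n - i) i)
          (frags ++ [((i : Int), ((pvScanOnes row (n - i) i : Int)) - 1)])
      else pvRowB row n fuel (i + 1) frags
    else frags

def split_list_by_v_alt (tensor : List (List Int)) : List (List (Int × Int)) :=
  tensor.map (fun row => pvRowB row row.length row.length 0 [])

-- ===== PRECONDITION & SPEC =====
def Spec_split_list_by_v (tensor : List (List Int)) (out : List (List (Int × Int))) : Prop := out = split_list_by_v_alt tensor
instance (tensor : List (List Int)) (out : List (List (Int × Int))) : Decidable (Spec_split_list_by_v tensor out) := by unfold Spec_split_list_by_v; infer_instance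

-- ===== CLAIM (what is proved, stated in full; the proofs are below) =====
def Claim_equal_split_list_by_v : Prop := ∀ (tensor : List (List Int)), Dom_split_list_by_v tensor → Spec_split_list_by_v tensor (split_list_by_v tensor)

-- ===== LEMMAS AND PROOFS =====

-- accumulator-free model of A's inner loop (st = start_index)
def pvGA (i : Int) (st : Option Int) : List Int → List (Int × Int)
  | [] => (match st with | some s => [(s, i - 1)] | none => [])
  | x :: xs =>
    if x == 1 then pvGA (i + 1) (match st with | none => some i | some s => some s) xs
    else match st with
      | some s => (s, i - 1) :: pvGA (i + 1) none xs
      | none => pvGA (i + 1) none xs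

def pvFinish (st : List (Int × Int) × Option Int) (e : Int) : List (Int × Int) :=
  match st.2 with
  | some s => st.1 ++ [(s, e - 1)]
  | none => st.1

theorem pvLoopA_eq_pvGA (xs : List Int) : ∀ (i : Int) (frags : List (Int × Int)) (st : Option Int),
    pvFinish (pvLoopA i (frags, st) xs) (i + xs.length) = frags ++ pvGA i st xs := by
  induction xs with
  | nil =>
    intro i frags st
    cases st <;> simp [pvLoopA, pvFinish, pvGA]
  | cons x xs ih =>
    intro i frags st
    have hlen : i + ((x :: xs).length : Int) = (i + 1) + (xs.length : Int) := by
      simp; omega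
    by_cases hx : x == 1
    · simp only [pvLoopA, hx, if_true, hlen]
      rw [ih]
      cases st <;> simp [pvGA, hx]
    · cases st with
      | none =>
        simp only [pvLoopA, hx, Bool.false_eq_true, if_false, hlen]
        rw [ih]
        simp [pvGA, hx]
      | some s =>
        simp only [pvLoopA, hx, Bool.false_eq_true, if_false, hlen]
        rw [ih]
        simp [pvGA, hx]

theorem pvGA_some (xs : List Int) : ∀ (s i : Int),
    pvGA i (some s) xs
      = (s, i + ((xs.takeWhile (fun x => x == 1)).length : Int) - 1)
          :: pvGA (i + ((xs.takeWhile (fun x => x == 1)).length : Int)) none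
               (xs.dropWhile (fun x => x == 1)) := by
  induction xs with
  | nil => intro s i; simp [pvGA]
  | cons x xs ih =>
    intro s i
    by_cases hx : x == 1
    · simp only [pvGA, hx, if_true, List.takeWhile_cons, List.dropWhile_cons]
      rw [ih]
      simp
      constructor <;> [omega; (congr 1; omega)]
    · simp [pvGA, hx]

theorem pvScanOnes_spec (row : List Int) : ∀ (fuel j : Nat), fuel = row.length - j →
    pvScanOnes row fuel j = j + ((row.drop j).takeWhile (fun x => x == 1)).length := by
  intro fuel
  induction fuel with
  | zero =>
    intro j hf
    have hdrop : row.drop j = [] := List.drop_eq_nil_of_le (by omega)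
    simp [pvScanOnes, hdrop]
  | succ fuel ih =>
    intro j hf
    have h : j < row.length := by omega
    have hdrop : row.drop j = row[j] :: row.drop (j + 1) := List.drop_eq_getElem_cons h
    have hgd : row.getD j 0 = row[j] := List.getD_eq_getElem row 0 h
    by_cases h1 : row[j] == 1
    · rw [pvScanOnes]
      simp only [hgd, h1, if_true]
      rw [ih (j + 1) (by omega)]
      have htw : ((row.drop j).takeWhile (fun x => x == 1)).length
          = ((row.drop (j+1)).takeWhile (fun x => x == 1)).length + 1 := by
        rw [hdrop, List.takeWhile_cons]; simp [h1]
      omega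
    · rw [pvScanOnes]
      simp only [hgd, h1, Bool.false_eq_true, if_false]
      have htw : ((row.drop j).takeWhile (fun x => x == 1)).length = 0 := by
        rw [hdrop, List.takeWhile_cons]; simp [h1]
      omega

-- dropWhile = drop (length of takeWhile)
theorem pv_dropWhile_eq_drop (p : Int → Bool) (xs : List Int) :
    xs.dropWhile p = xs.drop (xs.takeWhile p).length := by
  induction xs with
  | nil => rfl
  | cons x xs ih =>
    by_cases hx : p x <;> simp [hx, ih]

theorem pvRowB_spec (row : List Int) : ∀ (fuel i : Nat) (frags : List (Int × Int)),
    row.length - i ≤ fuel → i ≤ row.length →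
    pvRowB row row.length fuel i frags = frags ++ pvGA (i : Int) none (row.drop i) := by
  intro fuel
  induction fuel with
  | zero =>
    intro i frags hk hi
    have : i = row.length := by omega
    have hdrop : row.drop i = [] := List.drop_eq_nil_of_le (by omega)
    simp [pvRowB, hdrop, pvGA]
  | succ fuel ih =>
    intro i frags hk hi
    by_cases h : i < row.length
    · have hdrop : row.drop i = row[i] :: row.drop (i + 1) := List.drop_eq_getElem_cons h
      have hgd : row.getD i 0 = row[i] := List.getD_eq_getElem row 0 h
      by_cases h1 : row[i] == 1
      · rw [pvRowB]
        simp only [h, if_true, hgd, h1]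
        have hscan : pvScanOnes row (row.length - i) i
            = i + ((row.drop i).takeWhile (fun x => x == 1)).length :=
          pvScanOnes_spec row (row.length - i) i rfl
        have htw : ((row.drop i).takeWhile (fun x => x == 1)).length
            = ((row.drop (i+1)).takeWhile (fun x => x == 1)).length + 1 := by
          rw [hdrop, List.takeWhile_cons]; simp [h1]
        have htwle : ((row.drop (i+1)).takeWhile (fun x => x == 1)).length
            ≤ (row.drop (i+1)).length := (List.takeWhile_sublist _).length_le
        have hlen : (row.drop (i+1)).length = row.length - (i+1) := List.length_drop
        set t := ((row.drop (i+1)).takeWhile (fun x => x == 1)).length with ht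
        have hj : pvScanOnes row (row.length - i) i = i + 1 + t := by omega
        rw [ih (pvScanOnes row (row.length - i) i)
              (frags ++ [((i : Int), ((pvScanOnes row (row.length - i) i : Int)) - 1)])
              (by omega) (by omega)]
        rw [hdrop]
        simp only [pvGA, h1, if_true]
        rw [pvGA_some]
        have hdw : (row.drop (i+1)).dropWhile (fun x => x == 1) = row.drop (i + 1 + t) := by
          rw [pv_dropWhile_eq_drop, ← ht, List.drop_drop]
        rw [← ht, hdw, hj]
        have hcast : ((i + 1 + t : Nat) : Int) = (i : Int) + 1 + (t : Int) := by omega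
        rw [hcast]
        simp [List.append_assoc]
      · rw [pvRowB]
        simp only [h, if_true, hgd, h1]
        rw [ih (i + 1) frags (by omega) (by omega)]
        rw [hdrop]
        simp only [pvGA, h1]
        norm_num
    · have : i = row.length := by omega
      have hdrop : row.drop i = [] := List.drop_eq_nil_of_le (by omega)
      rw [pvRowB]
      simp [h, hdrop, pvGA]

theorem pvRow_eq (row : List Int) : pvRowA row = pvRowB row row.length row.length 0 [] := by
  have hA : pvRowA row = pvFinish (pvLoopA 0 ([], none) row) ((0 : Int) + row.length) := by
    simp [pvRowA, pvFinish]
  rw [hA, pvLoopA_eq_pvGA row 0 [] none,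
      pvRowB_spec row row.length 0 [] (by omega) (by omega)]
  simp

-- ===== VERDICT (by name: the statement is the Claim_ definition above) =====
theorem split_list_by_v_spec : Claim_equal_split_list_by_v := by
  intro tensor _
  unfold Spec_split_list_by_v split_list_by_v split_list_by_v_alt
  exact List.map_congr_left (fun row _ => pvRow_eq row)
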